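-- pv_equiv track=rewrite | github.com/QUSETIONS/MiniCode-Python | minicode/manage_cli.py | _take_repeat_option
-- ===== SOURCE A (Python) =====
-- def _take_repeat_option(args: list[str], name: str) -> list[str]:
--     values: list[str] = []
--     while name in args:
--         index = args.index(name)
--         if index + 1 >= len(args):
--             raise RuntimeError(f"Missing value for {name}")
--         values.append(args[index + 1])
--         del args[index : index + 2]
--     return values
-- ===== SOURCE B (Python) =====
-- # B: single left-to-right pass collecting values and rebuilding the surviving list once,
-- # instead of repeated `in`/`index`/`del` rescans; mutates args in place like A.
-- def _take_repeat_option(args: list[str], name: str) -> list[str]: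
--     values: list[str] = []
--     kept: list[str] = []
--     i = 0
--     n = len(args)
--     while i < n:
--         if args[i] == name:
--             if i + 1 >= n:
--                 raise RuntimeError(f"Missing value for {name}")
--             values.append(args[i + 1])
--             i += 2
--         else:
--             kept.append(args[i])
--             i += 1
--     args[:] = kept
--     return values
-- ===== Notes on version B (the rewrite author's own statement) =====
-- stated objective: alternative
-- what changed: Replaced the while-loop that rescans the list with `in`/`index` and deletes a flag/value pair each round by a single left-to-right pass that collects values and rebuilds the surviving list once.
import Mathlib
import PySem

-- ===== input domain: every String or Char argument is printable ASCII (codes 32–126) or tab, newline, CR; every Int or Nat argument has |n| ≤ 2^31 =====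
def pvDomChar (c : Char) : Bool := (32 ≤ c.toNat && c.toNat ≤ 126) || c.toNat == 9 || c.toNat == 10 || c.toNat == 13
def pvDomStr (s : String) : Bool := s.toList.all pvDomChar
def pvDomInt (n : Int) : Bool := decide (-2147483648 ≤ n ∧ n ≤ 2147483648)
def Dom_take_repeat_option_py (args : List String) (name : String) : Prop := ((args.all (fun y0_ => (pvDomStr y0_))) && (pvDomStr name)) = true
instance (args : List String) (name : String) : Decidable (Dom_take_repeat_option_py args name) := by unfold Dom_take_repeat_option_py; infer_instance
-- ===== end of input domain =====

-- B replaces A's repeated `in`/`index`/`del` rescans by ONE left-to-right pass (objective: alternative).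
-- A (and B) mutate `args` in place; the equivalence proved here is about the RETURN value only.

-- ===== PORT A =====
-- while name in args: index = args.index(name); if index+1 >= len(args): raise; values.append(args[index+1]); del args[index:index+2]
def takeA_loop (name : String) (values : List String) (args : List String) : List String :=
  match h : PySem.List.index? args name with
  | none => values                                  -- `name in args` is False: return values
  | some idx =>
    if h2 : args.length ≤ idx + 1 then values       -- Python raises RuntimeError here (excluded by Pre_)
    else
      takeA_loop name (values ++ [args[idx + 1]'(Nat.lt_of_not_le h2)])
        (args.take idx ++ args.drop (idx + 2))      -- del args[index : index+2]
termination_by args.length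
decreasing_by
  obtain ⟨hk, -, -⟩ := PySem.List.getElem_of_index?_eq_some h
  simp [List.length_take, List.length_drop]
  omega

def take_repeat_option_py (args : List String) (name : String) : List String :=
  takeA_loop name [] args

-- ===== PORT B =====
-- single pass, index i advancing by 2 on a flag (collect the value) and by 1 otherwise (keep the element);
-- returns (values, kept); kept is what Source B writes back into args
def goB (name : String) : List String → List String × List String
  | [] => ([], [])
  | x :: rest =>
    if x == name then
      match rest with
      | [] => ([], [])                              -- Python raises RuntimeError here (excluded by Pre_)
      | v :: rest' =>
        let p := goB name rest'
        (v :: p.1, p.2)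
    else
      let p := goB name rest
      (p.1, x :: p.2)

def take_repeat_option_py_alt (args : List String) (name : String) : List String :=
  (goB name args).1

-- ===== PRECONDITION & SPEC =====
-- Pre_ excludes exactly the inputs on which A raises RuntimeError ("Missing value"): those where the
-- maximal trailing run of elements equal to `name` has odd length (B raises there too).
def Pre_take_repeat_option_py (args : List String) (name : String) : Prop :=
  (args.reverse.takeWhile (fun x => x == name)).length % 2 = 0
instance (args : List String) (name : String) : Decidable (Pre_take_repeat_option_py args name) := by
  unfold Pre_take_repeat_option_py; infer_instance

def pvWitness_take_repeat_option_py : List String × String := (["-x", "a", "b", "-x", "c"], "-x")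

def Spec_take_repeat_option_py (args : List String) (name : String) (out : List String) : Prop := out = take_repeat_option_py_alt args name
instance (args : List String) (name : String) (out : List String) : Decidable (Spec_take_repeat_option_py args name out) := by unfold Spec_take_repeat_option_py; infer_instance

-- ===== CLAIM (what is proved, stated in full; the proofs are below) =====
def Claim_equal_take_repeat_option_py : Prop := ∀ (args : List String) (name : String), Dom_take_repeat_option_py args name → Pre_take_repeat_option_py args name → Spec_take_repeat_option_py args name (take_repeat_option_py args name)

-- ===== LEMMAS AND PROOFS =====

-- takeWhile of a name-free list is empty
lemma takeWhile_nil_of_not_mem (name : String) (l : List String) (h : name ∉ l) :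
    l.takeWhile (fun x => x == name) = [] := by
  cases l with
  | nil => rfl
  | cons x xs =>
    have hx : x ≠ name := by intro e; exact h (e ▸ List.mem_cons_self)
    simp [hx]

-- takeWhile over an append when the first part has a failing element
lemma takeWhile_append_of_exists {α : Type} (p : α → Bool) (l t : List α)
    (h : ¬ l.all p) : (l ++ t).takeWhile p = l.takeWhile p := by
  induction l with
  | nil => simp at h
  | cons x xs ih =>
    by_cases hx : p x
    · rw [List.all_cons, Bool.and_eq_true] at h
      simp only [List.cons_append, List.takeWhile_cons, hx]
      rw [ih (fun hc => h ⟨hx, hc⟩)]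
    · simp [hx]

-- takeWhile over an append when the first part fully satisfies p
lemma takeWhile_append_of_all {α : Type} (p : α → Bool) (l t : List α)
    (h : l.all p) : (l ++ t).takeWhile p = l ++ t.takeWhile p := by
  induction l with
  | nil => simp
  | cons x xs ih =>
    rw [List.all_cons, Bool.and_eq_true] at h
    simp [h.1, ih h.2]

-- B skips a name-free prefix (collecting no values from it)
lemma goB_skip (name : String) (p l : List String) (h : name ∉ p) :
    (goB name (p ++ l)).1 = (goB name l).1 := by
  induction p with
  | nil => rfl
  | cons x xs ih =>
    have hx : x ≠ name := by intro e; exact h (e ▸ List.mem_cons_self)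
    have hx' : (x == name) = false := by simpa using hx
    rw [List.cons_append, goB.eq_def]
    simp only [hx', Bool.false_eq_true, if_false]
    exact ih (fun hm => h (List.mem_cons_of_mem _ hm))

-- B returns no values on a name-free list
lemma goB_not_mem (name : String) (l : List String) (h : name ∉ l) :
    (goB name l).1 = [] := by
  have := goB_skip name l [] h
  simpa using this

-- key parity preservation: removing the first flag/value pair keeps the trailing name-run even
lemma pre_preserved (name v : String) (pre rest : List String) (hpre : name ∉ pre)
    (h : Pre_take_repeat_option_py (pre ++ name :: v :: rest) name) :
    Pre_take_repeat_option_py (pre ++ rest) name := by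
  unfold Pre_take_repeat_option_py at h ⊢
  have hP : pre.reverse.takeWhile (fun x => x == name) = [] :=
    takeWhile_nil_of_not_mem name _ (by simpa using hpre)
  have e1 : (pre ++ name :: v :: rest).reverse
      = rest.reverse ++ ([v] ++ ([name] ++ pre.reverse)) := by simp
  have e2 : (pre ++ rest).reverse = rest.reverse ++ pre.reverse := by simp
  rw [e1] at h
  rw [e2]
  by_cases hall : rest.reverse.all (fun x => x == name)
  · rw [takeWhile_append_of_all _ _ _ hall] at h
    rw [takeWhile_append_of_all _ _ _ hall, hP]
    by_cases hv : v = name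
    · have htw : List.takeWhile (fun x => x == name) ([v] ++ ([name] ++ pre.reverse))
          = [v, name] := by
        simp [hv, hP]
      rw [htw] at h
      simp at h ⊢
      omega
    · have hv' : (v == name) = false := by simpa using hv
      have htw : List.takeWhile (fun x => x == name) ([v] ++ ([name] ++ pre.reverse))
          = [] := by
        simp [hv']
      rw [htw] at h
      simpa using h
  · rw [takeWhile_append_of_exists _ _ _ hall] at h
    rw [takeWhile_append_of_exists _ _ _ hall]
    exact h

-- main loop invariant: A's loop equals values ++ B's values, for even trailing runs
lemma takeA_eq (name : String) : ∀ (n : Nat) (args : List String), args.length = n →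
    ∀ values, Pre_take_repeat_option_py args name →
      takeA_loop name values args = values ++ (goB name args).1 := by
  intro n
  induction n using Nat.strong_induction_on with
  | _ n ih =>
    intro args hlen values hpre
    rw [takeA_loop]
    split
    · rename_i h
      have hnin : name ∉ args := (PySem.List.index?_eq_none_iff _ _).mp h
      simp [goB_not_mem name args hnin]
    · rename_i idx h
      obtain ⟨pre, suf, hargs, hlenp, hnin⟩ := (PySem.List.index?_eq_some_iff _ _ _).mp h
      subst hargs
      cases suf with
      | nil =>
        -- A would raise here; Pre_ rules it out: the trailing run is exactly [name], odd
        exfalso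
        unfold Pre_take_repeat_option_py at hpre
        have e : (pre ++ [name]).reverse = [name] ++ pre.reverse := by simp
        rw [e, takeWhile_append_of_all _ _ _ (by simp),
            takeWhile_nil_of_not_mem name _ (by simpa using hnin)] at hpre
        simp at hpre
      | cons v rest =>
        have hgelen : ¬ (pre ++ name :: v :: rest).length ≤ idx + 1 := by
          simp [← hlenp]
        rw [dif_neg hgelen]
        -- the element taken is v, the list shrinks to pre ++ rest
        have hget : (pre ++ name :: v :: rest)[idx + 1]'(Nat.lt_of_not_le hgelen) = v := by
          subst hlenp
          rw [List.getElem_append_right (by omega)]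
          simp
        have htake : (pre ++ name :: v :: rest).take idx = pre := by
          subst hlenp; simp
        have hdrop : (pre ++ name :: v :: rest).drop (idx + 2) = rest := by
          subst hlenp
          rw [List.drop_append]
          simp
        rw [hget, htake, hdrop]
        have hpre' : Pre_take_repeat_option_py (pre ++ rest) name :=
          pre_preserved name v pre rest hnin hpre
        have hlen' : (pre ++ rest).length = n - 2 := by
          simp at hlen ⊢; omega
        have hlt : n - 2 < n := by
          simp at hlen; omega
        rw [ih (n - 2) hlt (pre ++ rest) hlen' (values ++ [v]) hpre']
        rw [goB_skip name pre rest hnin, goB_skip name pre (name :: v :: rest) hnin]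
        rw [goB]
        simp

-- ===== VERDICT (by name: the statement is the Claim_ definition above) =====
theorem take_repeat_option_py_spec : Claim_equal_take_repeat_option_py := by
  intro args name _ hpre
  unfold Spec_take_repeat_option_py take_repeat_option_py take_repeat_option_py_alt
  simpa using takeA_eq name args.length args rfl [] hpre
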